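-- pv_equiv track=rewrite | github.com/KrazyWes/MedFlow | CRISP-DM/data_understanding.py | infer_time_label
-- ===== SOURCE A (Python) =====
-- def infer_time_label(name: str) -> str:
--     s = str(name)
--     digits = "".join(ch for ch in s if ch.isdigit())
--     for i in range(0, len(digits) - 3):
--         chunk = digits[i : i + 4]
--         if chunk.startswith(("19", "20")):
--             return chunk
--     return s
-- ===== SOURCE B (Python) =====
-- def infer_time_label(name: str) -> str:
--     s = str(name)
--     ds = [ch for ch in s if ch.isdigit()]
--     while len(ds) >= 4:
--         if (ds[0] == "1" and ds[1] == "9") or (ds[0] == "2" and ds[1] == "0"):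
--             return "".join(ds[:4])
--         ds = ds[1:]
--     return s
-- ===== Notes on version B (the rewrite author's own statement) =====
-- stated objective: simpler
-- what changed: Replaces the index loop with slicing and tuple-startswith by a head-consuming scan over the digit list that inspects the first two characters directly and returns the first four on a hit.
import Mathlib
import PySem

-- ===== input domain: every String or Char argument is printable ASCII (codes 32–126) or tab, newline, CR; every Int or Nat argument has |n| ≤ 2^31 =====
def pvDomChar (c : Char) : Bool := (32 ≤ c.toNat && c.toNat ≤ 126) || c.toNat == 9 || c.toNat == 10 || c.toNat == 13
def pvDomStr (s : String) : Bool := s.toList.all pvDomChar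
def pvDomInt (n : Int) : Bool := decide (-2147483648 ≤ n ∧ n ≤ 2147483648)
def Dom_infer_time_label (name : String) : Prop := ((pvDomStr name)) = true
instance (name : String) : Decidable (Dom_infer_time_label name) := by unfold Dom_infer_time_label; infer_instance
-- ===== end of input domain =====

-- B replaces A's index loop (a fresh 4-slice + tuple-startswith per index) by a
-- head-consuming recursive scan of the digit list; objective: simpler (same cost).

-- ===== PORT A =====
-- the 'for i in range(0, len(digits) - 3)' loop with early return, over the index list
def pvLoopA (d : List Char) : List Int → Option (List Char)
  | [] => none
  | i :: rest =>
      let chunk := PySem.List.slice d (some i) (some (i + 4))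
      if PySem.Chars.startswith chunk ['1', '9'] || PySem.Chars.startswith chunk ['2', '0'] then
        some chunk
      else
        pvLoopA d rest

def infer_time_label (name : String) : String :=
  let s := name
  let digits := s.toList.filter (fun ch => PySem.Chars.isdigit ch)
  match pvLoopA digits (PySem.List.pyRange 0 ((digits.length : Int) - 3) 1) with
  | some chunk => String.ofList chunk
  | none => s

-- ===== PORT B =====
-- the 'while len(ds) >= 4: … ds = ds[1:]' loop as structural recursion on the digit list
def pvFindYear : List Char → Option (List Char)
  | a :: b :: c :: d :: rest =>
      if (a = '1' ∧ b = '9') ∨ (a = '2' ∧ b = '0') then some [a, b, c, d]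
      else pvFindYear (b :: c :: d :: rest)
  | _ => none

def infer_time_label_alt (name : String) : String :=
  let s := name
  let ds := s.toList.filter (fun ch => PySem.Chars.isdigit ch)
  match pvFindYear ds with
  | some y => String.ofList y
  | none => s

-- ===== PRECONDITION & SPEC =====
def Spec_infer_time_label (name : String) (out : String) : Prop := out = infer_time_label_alt name
instance (name : String) (out : String) : Decidable (Spec_infer_time_label name out) := by unfold Spec_infer_time_label; infer_instance

-- ===== CLAIM (what is proved, stated in full; the proofs are below) =====
def Claim_equal_infer_time_label : Prop := ∀ (name : String), Dom_infer_time_label name → Spec_infer_time_label name (infer_time_label name)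

-- ===== LEMMAS AND PROOFS =====

-- prepending one character and shifting every index up by one leaves A's loop unchanged
theorem pvLoopA_shift (x : Char) (d : List Char) (idxs : List Int) (h : ∀ i ∈ idxs, 0 ≤ i) :
    pvLoopA (x :: d) (idxs.map (fun i => i + 1)) = pvLoopA d idxs := by
  induction idxs with
  | nil => rfl
  | cons i rest ih =>
      have hi : (0 : Int) ≤ i := h i (List.mem_cons_self ..)
      rw [List.map_cons]
      simp only [pvLoopA]
      have hs : PySem.List.slice (x :: d) (some (i + 1)) (some (i + 1 + 4))
          = PySem.List.slice d (some i) (some (i + 4)) := by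
        rw [PySem.List.slice_toNat _ (by omega) (by omega),
            PySem.List.slice_toNat _ hi (by omega)]
        have e1 : (i + 1).toNat = i.toNat + 1 := by omega
        rw [e1, List.drop_succ_cons]
        congr 1
        omega
      rw [hs, ih (fun j hj => h j (List.mem_cons_of_mem _ hj))]

-- the startswith-tuple test on a 4-chunk reads exactly the first two characters
theorem pvStarts_iff (a b c e p q : Char) :
    PySem.Chars.startswith [a, b, c, e] [p, q] = true ↔ (a = p ∧ b = q) := by
  rw [PySem.Chars.startswith_iff, List.cons_prefix_cons, List.cons_prefix_cons]
  constructor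
  · rintro ⟨h1, h2, -⟩; exact ⟨h1.symm, h2.symm⟩
  · rintro ⟨h1, h2⟩; exact ⟨h1.symm, h2.symm, by simp⟩

-- A's loop over range(0, len(d) - 3) computes B's recursive scan
theorem pvLoopA_eq_findYear (d : List Char) :
    pvLoopA d (PySem.List.pyRange 0 ((d.length : Int) - 3) 1) = pvFindYear d := by
  induction d with
  | nil => rfl
  | cons a t ih =>
      cases t with
      | nil => rfl
      | cons b t2 =>
        cases t2 with
        | nil => rfl
        | cons c t3 =>
          cases t3 with
          | nil => rfl
          | cons e rest =>
            have hlen : ((a :: b :: c :: e :: rest).length : Int) - 3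
                = (rest.length : Int) + 1 := by simp; omega
            have hpos : (0 : Int) < ((a :: b :: c :: e :: rest).length : Int) - 3 := by
              rw [hlen]; positivity
            rw [PySem.List.pyRange_one_cons hpos]
            simp only [pvLoopA]
            have hchunk : PySem.List.slice (a :: b :: c :: e :: rest) (some 0) (some (0 + 4))
                = [a, b, c, e] := by
              rw [PySem.List.slice_toNat _ (by norm_num) (by norm_num)]
              rfl
            rw [hchunk]
            have hcond : (PySem.Chars.startswith [a, b, c, e] ['1', '9']
                || PySem.Chars.startswith [a, b, c, e] ['2', '0']) = true
                ↔ ((a = '1' ∧ b = '9') ∨ (a = '2' ∧ b = '0')) := by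
              rw [Bool.or_eq_true, pvStarts_iff, pvStarts_iff]
            by_cases hm : (a = '1' ∧ b = '9') ∨ (a = '2' ∧ b = '0')
            · rw [if_pos (hcond.mpr hm)]
              simp only [pvFindYear, if_pos hm]
            · rw [if_neg (fun hx => hm (hcond.mp hx))]
              simp only [pvFindYear, if_neg hm]
              -- shift the remaining indices down by one and apply the IH on the tail
              have h1 : PySem.List.pyRange (0 + 1) ((rest.length : Int) + 1) 1
                  = (PySem.List.pyRange 0 (rest.length : Int) 1).map (fun i => i + 1) := by
                rw [PySem.List.pyRange_one, PySem.List.pyRange_one, List.map_map]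
                have e1 : ((rest.length : Int) + 1 - (0 + 1)).toNat = rest.length := by omega
                have e2 : ((rest.length : Int) - 0).toNat = rest.length := by omega
                rw [e1, e2]
                exact List.map_congr_left (fun k _ => by simp [Function.comp]; ring)
              have e3 : (rest.length : Int) = ((b :: c :: e :: rest).length : Int) - 3 := by
                simp
                omega
              rw [hlen, h1,
                  pvLoopA_shift a (b :: c :: e :: rest) _
                    (fun j hj => (PySem.List.mem_pyRange_one.mp hj).1),
                  e3, ih]

-- ===== VERDICT (by name: the statement is the Claim_ definition above) =====
theorem infer_time_label_spec : Claim_equal_infer_time_label := by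
  intro name _
  unfold Spec_infer_time_label infer_time_label infer_time_label_alt
  simp only [pvLoopA_eq_findYear]
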